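-- pv_equiv track=rewrite | github.com/GoldenAnpu/TNCF | product_generator.py | caps_creator
-- ===== SOURCE A (Python) =====
-- def product_result(*args):
--     """ITERTOOLS PRODUCT FUNCTION SUPPORT"""
--     # product('ABCD', 'xy') --> Ax Ay Bx By Cx Cy Dx Dy
--     # product(range(2), repeat=3) --> 000 001 010 011 100 101 110 111
--     pools = [tuple(pool) for pool in args]
--     pool_result = [[]]
--     for pool in pools:
--         pool_result = [x + [y] for x in pool_result for y in pool]
--     return pool_result
--
-- def caps_creator(creams, tops, lids):
--     random_caps = product_result(creams, tops, lids)
--     caps = []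
--     for cap in random_caps:
--         if 'top_star_sweet' in cap and 'lid_6_up' in cap:
--             pass
--         elif 'top_eggshell' in cap and 'cream_1_milk' in cap:
--             pass
--         elif 'top_eggshell' in cap and 'cream_4_ice' in cap:
--             pass
--         elif 'top_jem_1' in cap and 'cream_1_milk' in cap:
--             pass
--         elif 'top_jem_1' in cap and 'cream_4_ice' in cap:
--             pass
--         elif 'top_jem_1' in cap and 'cream_3_ice_balls' in cap:
--             pass
--         elif 'top_jem_2_drop' in cap and 'cream_1_milk' in cap:
--             pass
--         elif 'top_jem_2_drop' in cap and 'cream_4_ice' in cap: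
--             pass
--         elif 'top_jem_2_drop' in cap and 'cream_3_ice_balls' in cap:
--             pass
--         elif 'top_jem_2_drop' in cap and 'lid_6_up' in cap:
--             pass
--         elif 'cream_3_ice_balls' in cap and 'top_pills_happy' in cap:
--             pass
--         elif 'cream_3_ice_balls' in cap and 'top_star_sweet' in cap:
--             pass
--         elif 'cream_2_chocolate' in cap and 'top_pills_happy' in cap:
--             pass
--         elif 'cream_2_chocolate' in cap and 'top_star_sweet' in cap:
--             pass
--         else:
--             caps.append(cap)
--     return caps
-- ===== SOURCE B (Python) =====
-- FORBIDDEN = [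
--     ("top_star_sweet", "lid_6_up"),
--     ("top_eggshell", "cream_1_milk"),
--     ("top_eggshell", "cream_4_ice"),
--     ("top_jem_1", "cream_1_milk"),
--     ("top_jem_1", "cream_4_ice"),
--     ("top_jem_1", "cream_3_ice_balls"),
--     ("top_jem_2_drop", "cream_1_milk"),
--     ("top_jem_2_drop", "cream_4_ice"),
--     ("top_jem_2_drop", "cream_3_ice_balls"),
--     ("top_jem_2_drop", "lid_6_up"),
--     ("cream_3_ice_balls", "top_pills_happy"),
--     ("cream_3_ice_balls", "top_star_sweet"),
--     ("cream_2_chocolate", "top_pills_happy"),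
--     ("cream_2_chocolate", "top_star_sweet"),
-- ]
--
-- # Index the forbidden pairs once: PARTNERS[x] = every item that may not occur together with x.
-- PARTNERS = {}
-- for a, b in FORBIDDEN:
--     PARTNERS.setdefault(a, []).append(b)
--     PARTNERS.setdefault(b, []).append(a)
--
-- def caps_creator(creams, tops, lids):
--     # Prune whole (cream, top) branches early; for surviving pairs only a
--     # membership test against the precomputed partner lists remains per lid.
--     caps = []
--     for cream in creams:
--         pc = PARTNERS.get(cream, [])
--         for top in tops:
--             if top in pc:
--                 continue
--             bad = pc + PARTNERS.get(top, [])
--             for lid in lids: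
--                 if lid not in bad:
--                     caps.append([cream, top, lid])
--     return caps
-- ===== Notes on version B (the rewrite author's own statement) =====
-- stated objective: alternative
-- what changed: Replaced the generic fold-based cartesian-product helper plus a 14-branch if/elif chain per triple with a partner index (dict item -> incompatible items) built once from the pair table, early pruning of whole (cream, top) branches, and a per-(cream, top) precomputed bad-lid list so the inner loop is a single membership test.
import Mathlib
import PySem

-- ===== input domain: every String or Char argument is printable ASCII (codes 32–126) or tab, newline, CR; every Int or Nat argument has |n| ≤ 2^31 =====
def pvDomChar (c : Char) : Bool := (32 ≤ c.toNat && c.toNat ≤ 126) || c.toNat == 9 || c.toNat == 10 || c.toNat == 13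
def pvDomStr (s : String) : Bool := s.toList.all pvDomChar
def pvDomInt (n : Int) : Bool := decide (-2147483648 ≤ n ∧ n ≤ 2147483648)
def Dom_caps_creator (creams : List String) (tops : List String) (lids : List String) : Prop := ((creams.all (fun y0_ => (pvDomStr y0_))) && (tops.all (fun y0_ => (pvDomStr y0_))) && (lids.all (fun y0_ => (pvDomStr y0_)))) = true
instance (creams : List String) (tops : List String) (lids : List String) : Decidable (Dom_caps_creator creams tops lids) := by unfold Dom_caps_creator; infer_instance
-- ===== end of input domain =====

-- B indexes the 14 forbidden pairs once into a partner table, prunes whole (cream, top)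
-- branches early and tests lids against a precomputed bad list (objective: alternative; same cost).


-- ===== PORT A =====
-- product_result(*args): fold over the pools, extending each partial tuple by each element
def product_result (pools : List (List String)) : List (List String) :=
  pools.foldl (fun pool_result pool => pool_result.flatMap (fun x => pool.map (fun y => x ++ [y]))) [[]]

def caps_creator (creams : List String) (tops : List String) (lids : List String) : List (List String) :=
  let random_caps := product_result [creams, tops, lids]
  random_caps.foldl (fun caps cap =>
    if cap.contains "top_star_sweet" && cap.contains "lid_6_up" then caps
    else if cap.contains "top_eggshell" && cap.contains "cream_1_milk" then caps
    else if cap.contains "top_eggshell" && cap.contains "cream_4_ice" then caps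
    else if cap.contains "top_jem_1" && cap.contains "cream_1_milk" then caps
    else if cap.contains "top_jem_1" && cap.contains "cream_4_ice" then caps
    else if cap.contains "top_jem_1" && cap.contains "cream_3_ice_balls" then caps
    else if cap.contains "top_jem_2_drop" && cap.contains "cream_1_milk" then caps
    else if cap.contains "top_jem_2_drop" && cap.contains "cream_4_ice" then caps
    else if cap.contains "top_jem_2_drop" && cap.contains "cream_3_ice_balls" then caps
    else if cap.contains "top_jem_2_drop" && cap.contains "lid_6_up" then caps
    else if cap.contains "cream_3_ice_balls" && cap.contains "top_pills_happy" then caps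
    else if cap.contains "cream_3_ice_balls" && cap.contains "top_star_sweet" then caps
    else if cap.contains "cream_2_chocolate" && cap.contains "top_pills_happy" then caps
    else if cap.contains "cream_2_chocolate" && cap.contains "top_star_sweet" then caps
    else caps ++ [cap]) []

-- ===== PORT B =====
def FORBIDDEN : List (String × String) :=
  [("top_star_sweet", "lid_6_up"),
   ("top_eggshell", "cream_1_milk"),
   ("top_eggshell", "cream_4_ice"),
   ("top_jem_1", "cream_1_milk"),
   ("top_jem_1", "cream_4_ice"),
   ("top_jem_1", "cream_3_ice_balls"),
   ("top_jem_2_drop", "cream_1_milk"),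
   ("top_jem_2_drop", "cream_4_ice"),
   ("top_jem_2_drop", "cream_3_ice_balls"),
   ("top_jem_2_drop", "lid_6_up"),
   ("cream_3_ice_balls", "top_pills_happy"),
   ("cream_3_ice_balls", "top_star_sweet"),
   ("cream_2_chocolate", "top_pills_happy"),
   ("cream_2_chocolate", "top_star_sweet")]

-- PARTNERS.setdefault(a, []).append(b) is d[a] = d.get(a, []) + [b], i.e. Dict.modify a [] (· ++ [b])
def PARTNERS : PySem.Dict String (List String) :=
  FORBIDDEN.foldl (fun d p => (d.modify p.1 [] (· ++ [p.2])).modify p.2 [] (· ++ [p.1])) PySem.Dict.empty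

def caps_creator_alt (creams : List String) (tops : List String) (lids : List String) : List (List String) :=
  creams.foldl (fun caps cream =>
    let pc := PARTNERS.getD cream []
    tops.foldl (fun caps top =>
      if pc.contains top then caps   -- continue
      else
        let bad := pc ++ PARTNERS.getD top []
        lids.foldl (fun caps lid =>
          if bad.contains lid then caps else caps ++ [[cream, top, lid]]) caps) caps) []

-- ===== PRECONDITION & SPEC =====
def Spec_caps_creator (creams : List String) (tops : List String) (lids : List String) (out : List (List String)) : Prop := out = caps_creator_alt creams tops lids
instance (creams : List String) (tops : List String) (lids : List String) (out : List (List String)) : Decidable (Spec_caps_creator creams tops lids out) := by unfold Spec_caps_creator; infer_instance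

-- ===== CLAIM (what is proved, stated in full; the proofs are below) =====
def Claim_equal_caps_creator : Prop := ∀ (creams : List String) (tops : List String) (lids : List String), Dom_caps_creator creams tops lids → Spec_caps_creator creams tops lids (caps_creator creams tops lids)

-- ===== LEMMAS AND PROOFS =====

-- the boolean predicate A's chain skips on (the 14 branches collapsed into one disjunction)
def chainBad (cap : List String) : Bool :=
  (cap.contains "top_star_sweet" && cap.contains "lid_6_up") ||
  (cap.contains "top_eggshell" && cap.contains "cream_1_milk") ||
  (cap.contains "top_eggshell" && cap.contains "cream_4_ice") ||
  (cap.contains "top_jem_1" && cap.contains "cream_1_milk") ||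
  (cap.contains "top_jem_1" && cap.contains "cream_4_ice") ||
  (cap.contains "top_jem_1" && cap.contains "cream_3_ice_balls") ||
  (cap.contains "top_jem_2_drop" && cap.contains "cream_1_milk") ||
  (cap.contains "top_jem_2_drop" && cap.contains "cream_4_ice") ||
  (cap.contains "top_jem_2_drop" && cap.contains "cream_3_ice_balls") ||
  (cap.contains "top_jem_2_drop" && cap.contains "lid_6_up") ||
  (cap.contains "cream_3_ice_balls" && cap.contains "top_pills_happy") ||
  (cap.contains "cream_3_ice_balls" && cap.contains "top_star_sweet") ||
  (cap.contains "cream_2_chocolate" && cap.contains "top_pills_happy") ||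
  (cap.contains "cream_2_chocolate" && cap.contains "top_star_sweet")

-- code of a string: which of the ten forbidden items it is (10 = none of them)
def code (x : String) : Fin 11 :=
  if x == "top_star_sweet" then 0
  else if x == "lid_6_up" then 1
  else if x == "top_eggshell" then 2
  else if x == "cream_1_milk" then 3
  else if x == "cream_4_ice" then 4
  else if x == "top_jem_1" then 5
  else if x == "cream_3_ice_balls" then 6
  else if x == "top_jem_2_drop" then 7
  else if x == "top_pills_happy" then 8
  else if x == "cream_2_chocolate" then 9
  else 10

-- partner lists on the string side (value of PARTNERS at each code) and on the code side
def pstr : Fin 11 → List String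
  | 0 => ["lid_6_up", "cream_3_ice_balls", "cream_2_chocolate"]
  | 1 => ["top_star_sweet", "top_jem_2_drop"]
  | 2 => ["cream_1_milk", "cream_4_ice"]
  | 3 => ["top_eggshell", "top_jem_1", "top_jem_2_drop"]
  | 4 => ["top_eggshell", "top_jem_1", "top_jem_2_drop"]
  | 5 => ["cream_1_milk", "cream_4_ice", "cream_3_ice_balls"]
  | 6 => ["top_jem_1", "top_jem_2_drop", "top_pills_happy", "top_star_sweet"]
  | 7 => ["cream_1_milk", "cream_4_ice", "cream_3_ice_balls", "lid_6_up"]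
  | 8 => ["cream_3_ice_balls", "cream_2_chocolate"]
  | 9 => ["top_pills_happy", "top_star_sweet"]
  | 10 => []

def pcode : Fin 11 → List (Fin 11)
  | 0 => [1, 6, 9]
  | 1 => [0, 7]
  | 2 => [3, 4]
  | 3 => [2, 5, 7]
  | 4 => [2, 5, 7]
  | 5 => [3, 4, 6]
  | 6 => [5, 7, 8, 0]
  | 7 => [3, 4, 6, 1]
  | 8 => [6, 9]
  | 9 => [8, 0]
  | 10 => []

-- A's chain predicate on the code side
def chainF (a b c : Fin 11) : Bool :=
  let has : Fin 11 → Bool := fun i => decide (a = i) || decide (b = i) || decide (c = i)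
  (has 0 && has 1) || (has 2 && has 3) || (has 2 && has 4) ||
  (has 5 && has 3) || (has 5 && has 4) || (has 5 && has 6) ||
  (has 7 && has 3) || (has 7 && has 4) || (has 7 && has 6) || (has 7 && has 1) ||
  (has 6 && has 8) || (has 6 && has 0) || (has 9 && has 8) || (has 9 && has 0)

theorem atom0 (x : String) : (x = "top_star_sweet") ↔ (code x = 0) := by
  unfold code; split_ifs <;> simp_all
theorem atom1 (x : String) : (x = "lid_6_up") ↔ (code x = 1) := by
  unfold code; split_ifs <;> simp_all
theorem atom2 (x : String) : (x = "top_eggshell") ↔ (code x = 2) := by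
  unfold code; split_ifs <;> simp_all
theorem atom3 (x : String) : (x = "cream_1_milk") ↔ (code x = 3) := by
  unfold code; split_ifs <;> simp_all
theorem atom4 (x : String) : (x = "cream_4_ice") ↔ (code x = 4) := by
  unfold code; split_ifs <;> simp_all
theorem atom5 (x : String) : (x = "top_jem_1") ↔ (code x = 5) := by
  unfold code; split_ifs <;> simp_all
theorem atom6 (x : String) : (x = "cream_3_ice_balls") ↔ (code x = 6) := by
  unfold code; split_ifs <;> simp_all
theorem atom7 (x : String) : (x = "top_jem_2_drop") ↔ (code x = 7) := by
  unfold code; split_ifs <;> simp_all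
theorem atom8 (x : String) : (x = "top_pills_happy") ↔ (code x = 8) := by
  unfold code; split_ifs <;> simp_all
theorem atom9 (x : String) : (x = "cream_2_chocolate") ↔ (code x = 9) := by
  unfold code; split_ifs <;> simp_all

theorem atom0' (x : String) : ("top_star_sweet" = x) ↔ (code x = 0) := by
  rw [eq_comm]; exact atom0 x
theorem atom1' (x : String) : ("lid_6_up" = x) ↔ (code x = 1) := by
  rw [eq_comm]; exact atom1 x
theorem atom2' (x : String) : ("top_eggshell" = x) ↔ (code x = 2) := by
  rw [eq_comm]; exact atom2 x
theorem atom3' (x : String) : ("cream_1_milk" = x) ↔ (code x = 3) := by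
  rw [eq_comm]; exact atom3 x
theorem atom4' (x : String) : ("cream_4_ice" = x) ↔ (code x = 4) := by
  rw [eq_comm]; exact atom4 x
theorem atom5' (x : String) : ("top_jem_1" = x) ↔ (code x = 5) := by
  rw [eq_comm]; exact atom5 x
theorem atom6' (x : String) : ("cream_3_ice_balls" = x) ↔ (code x = 6) := by
  rw [eq_comm]; exact atom6 x
theorem atom7' (x : String) : ("top_jem_2_drop" = x) ↔ (code x = 7) := by
  rw [eq_comm]; exact atom7 x
theorem atom8' (x : String) : ("top_pills_happy" = x) ↔ (code x = 8) := by
  rw [eq_comm]; exact atom8 x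
theorem atom9' (x : String) : ("cream_2_chocolate" = x) ↔ (code x = 9) := by
  rw [eq_comm]; exact atom9 x

-- PARTNERS is a closed computation; its literal value
theorem PARTNERS_mk : PARTNERS = PySem.Dict.mk
    [("top_star_sweet", ["lid_6_up", "cream_3_ice_balls", "cream_2_chocolate"]),
     ("lid_6_up", ["top_star_sweet", "top_jem_2_drop"]),
     ("top_eggshell", ["cream_1_milk", "cream_4_ice"]),
     ("cream_1_milk", ["top_eggshell", "top_jem_1", "top_jem_2_drop"]),
     ("cream_4_ice", ["top_eggshell", "top_jem_1", "top_jem_2_drop"]),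
     ("top_jem_1", ["cream_1_milk", "cream_4_ice", "cream_3_ice_balls"]),
     ("cream_3_ice_balls", ["top_jem_1", "top_jem_2_drop", "top_pills_happy", "top_star_sweet"]),
     ("top_jem_2_drop", ["cream_1_milk", "cream_4_ice", "cream_3_ice_balls", "lid_6_up"]),
     ("top_pills_happy", ["cream_3_ice_balls", "cream_2_chocolate"]),
     ("cream_2_chocolate", ["top_pills_happy", "top_star_sweet"])] := by decide

theorem getD_PARTNERS (x : String) : PARTNERS.getD x [] = pstr (code x) := by
  unfold code
  split_ifs with h1 h2 h3 h4 h5 h6 h7 h8 h9 h10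
  all_goals simp only [beq_iff_eq] at *
  all_goals try (subst_vars; decide)
  simp [PARTNERS_mk, PySem.Dict.getD_eq_get?_getD, PySem.Dict.get?,
    Ne.symm h1, Ne.symm h2, Ne.symm h3, Ne.symm h4, Ne.symm h5, Ne.symm h6, Ne.symm h7,
    Ne.symm h8, Ne.symm h9, Ne.symm h10, pstr]

theorem contains_pstr (k : Fin 11) (y : String) :
    (pstr k).contains y = (pcode k).contains (code y) := by
  fin_cases k <;>
    simp [pstr, pcode,
      atom0, atom1, atom2, atom3, atom4, atom5, atom6, atom7, atom8, atom9]

theorem chainBad_code (c t l : String) :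
    chainBad [c, t, l] = chainF (code c) (code t) (code l) := by
  simp [chainBad, chainF, Bool.or_assoc,
    atom0', atom1', atom2', atom3', atom4', atom5', atom6', atom7', atom8', atom9']

theorem codeF_eq : ∀ a b c : Fin 11,
    chainF a b c = ((pcode a).contains b || ((pcode a).contains c || (pcode b).contains c)) := by
  decide

-- the key pointwise fact: A's 14-branch test equals B's partner-table test
theorem key (c t l : String) :
    chainBad [c, t, l]
      = ((PARTNERS.getD c []).contains t ||
         (PARTNERS.getD c [] ++ PARTNERS.getD t []).contains l) := by
  rw [chainBad_code, codeF_eq (code c) (code t) (code l), getD_PARTNERS, getD_PARTNERS, List.contains_append,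
    contains_pstr, contains_pstr, contains_pstr]

-- collapse an if/elif chain with identical 'then' branches into a single disjunction
theorem if_if {α : Type} (a b : Bool) (x y : α) :
    (if a then x else if b then x else y) = if (a || b) then x else y := by
  cases a <;> simp

-- a skip-or-append foldl is a filter
theorem foldl_skip_append {α : Type} (p : α → Bool) (xs : List α) (acc : List α) :
    xs.foldl (fun acc x => if p x then acc else acc ++ [x]) acc
      = acc ++ xs.filter (fun x => !p x) := by
  induction xs generalizing acc with
  | nil => simp
  | cons x xs ih => by_cases h : p x <;> simp [List.foldl_cons, h, ih]

-- the three fold steps of product_result give the nested-loop product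
theorem product_result_three (cs ts ls : List String) :
    product_result [cs, ts, ls]
      = cs.flatMap (fun c => ts.flatMap (fun t => ls.map (fun l => [c, t, l]))) := by
  simp [product_result, List.foldl, List.flatMap_map, List.flatMap_assoc]

-- A is the product filtered by chainBad
theorem A_filter (creams tops lids : List String) :
    caps_creator creams tops lids
      = (product_result [creams, tops, lids]).filter (fun cap => !chainBad cap) := by
  unfold caps_creator
  simp only [if_if]
  rw [foldl_skip_append]
  simp [chainBad, Bool.or_assoc]

-- a skip-or-extend fold is a flatMap with an empty branch
theorem foldl_skip_extend {α β : Type} (p : β → Bool) (g : β → List α) (xs : List β)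
    (acc : List α) :
    xs.foldl (fun acc x => if p x then acc else acc ++ g x) acc
      = acc ++ xs.flatMap (fun x => if p x then [] else g x) := by
  induction xs generalizing acc with
  | nil => simp
  | cons x xs ih => by_cases h : p x <;> simp [List.foldl_cons, h, ih]

-- B in flatMap form
theorem alt_flatMap (creams tops lids : List String) :
    caps_creator_alt creams tops lids
      = creams.flatMap (fun cream =>
          tops.flatMap (fun top =>
            if (PARTNERS.getD cream []).contains top then []
            else lids.flatMap (fun lid =>
              if (PARTNERS.getD cream [] ++ PARTNERS.getD top []).contains lid then []
              else [[cream, top, lid]]))) := by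
  unfold caps_creator_alt
  simp only [foldl_skip_extend, PySem.List.foldl_append_eq_flatMap, List.nil_append]

-- per (cream, top): A's filtered map over the lids equals B's pruned inner loop
theorem per_ct (c t : String) (lids : List String) :
    (lids.map (fun l => [c, t, l])).filter (fun cap => !chainBad cap)
      = (if (PARTNERS.getD c []).contains t then []
         else lids.flatMap (fun lid =>
           if (PARTNERS.getD c [] ++ PARTNERS.getD t []).contains lid then []
           else [[c, t, lid]])) := by
  induction lids with
  | nil => simp
  | cons l ls ih =>
    by_cases h1 : (PARTNERS.getD c []).contains t <;>
      by_cases h2 : (PARTNERS.getD c [] ++ PARTNERS.getD t []).contains l <;>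
        simp_all [key]

-- ===== VERDICT (by name: the statement is the Claim_ definition above) =====
theorem caps_creator_spec : Claim_equal_caps_creator := by
  intro creams tops lids _
  unfold Spec_caps_creator
  rw [A_filter, alt_flatMap, product_result_three]
  simp only [List.filter_flatMap, per_ct]
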